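-- pv_equiv track=rewrite | github.com/HazyResearch/metal | metal/mmtl/debugging/slicing.py | slice_numbers
-- ===== SOURCE A (Python) =====
-- def slice_numbers(row):
--     sent1 = row["sentence1"]
--     sent2 = row["sentence2"]
--     for num in range(10):
--         if str(num) in sent2 and str(num) not in sent1:
--             return True
--         if str(num) in sent1 and str(num) not in sent2:
--             return True
--     return False
-- ===== SOURCE B (Python) =====
-- def slice_numbers(row):
--     digits = set("0123456789")
--     d1 = set(row["sentence1"]) & digits
--     d2 = set(row["sentence2"]) & digits
--     return d1 != d2
-- ===== Notes on version B (the rewrite author's own statement) =====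
-- stated objective: idiomatic
-- what changed: Replaces A's fixed loop over the ten digit strings with per-sentence substring membership tests by building each sentence's set of ASCII digit characters (set(sent) & set('0123456789')) once and returning whether the two digit-sets differ.
import Mathlib
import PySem

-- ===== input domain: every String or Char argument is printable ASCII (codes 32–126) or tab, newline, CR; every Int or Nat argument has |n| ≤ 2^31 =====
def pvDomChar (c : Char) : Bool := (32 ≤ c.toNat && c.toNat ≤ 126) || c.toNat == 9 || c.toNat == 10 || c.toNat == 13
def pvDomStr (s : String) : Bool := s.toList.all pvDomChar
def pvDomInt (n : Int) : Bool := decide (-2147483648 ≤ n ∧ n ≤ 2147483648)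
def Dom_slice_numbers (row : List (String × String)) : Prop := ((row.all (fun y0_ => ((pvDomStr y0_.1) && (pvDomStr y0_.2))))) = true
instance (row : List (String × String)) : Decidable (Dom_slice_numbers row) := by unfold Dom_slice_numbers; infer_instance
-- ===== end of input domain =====

-- B replaces A's loop over the ten digit strings (substring tests on both sentences) by
-- building each sentence's set of ASCII digit characters once and comparing the two sets (idiomatic).


-- ===== PORT A =====
-- dict lookup row[k] on the association list: first matching key (exact for a Python dict,
-- whose keys are unique); none = KeyError
def pvLookup (row : List (String × String)) (k : String) : Option String :=
  (row.find? (fun p => p.1 == k)).map (fun p => p.2)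

-- literal port of A: for num in range(10), substring tests with early return True
def slice_numbers (row : List (String × String)) : Bool :=
  match pvLookup row "sentence1", pvLookup row "sentence2" with
  | some sent1, some sent2 =>
      (PySem.List.pyRange 0 10 1).any (fun num =>
        (PySem.Str.isIn (PySem.Int.toStr num) sent2 && !(PySem.Str.isIn (PySem.Int.toStr num) sent1)) ||
        (PySem.Str.isIn (PySem.Int.toStr num) sent1 && !(PySem.Str.isIn (PySem.Int.toStr num) sent2)))
  | _, _ => false

-- ===== PORT B =====
-- digits = set("0123456789")
def pvDigits : PySem.Set Char := PySem.Set.ofList "0123456789".toList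

-- port of B: d1 = set(sent1) & digits; d2 = set(sent2) & digits; return d1 != d2
def slice_numbers_alt (row : List (String × String)) : Bool :=
  match pvLookup row "sentence1" with
  | none => false
  | some sent1 =>
    match pvLookup row "sentence2" with
    | none => false
    | some sent2 =>
      let d1 := PySem.Set.inter (PySem.Set.ofList sent1.toList) pvDigits
      let d2 := PySem.Set.inter (PySem.Set.ofList sent2.toList) pvDigits
      !(PySem.Set.equal d1 d2)

-- ===== PRECONDITION & SPEC =====
-- Pre_ excludes rows missing the key "sentence1" or "sentence2", on which A raises KeyError.
def Pre_slice_numbers (row : List (String × String)) : Prop :=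
  ((row.find? (fun p => p.1 == "sentence1")).isSome = true) ∧
  ((row.find? (fun p => p.1 == "sentence2")).isSome = true)
instance (row : List (String × String)) : Decidable (Pre_slice_numbers row) := by
  unfold Pre_slice_numbers; infer_instance

def pvWitness_slice_numbers : (List (String × String)) :=
  [("sentence1", "a 1 b"), ("sentence2", "no digits")]

def Spec_slice_numbers (row : List (String × String)) (out : Bool) : Prop := out = slice_numbers_alt row
instance (row : List (String × String)) (out : Bool) : Decidable (Spec_slice_numbers row out) := by unfold Spec_slice_numbers; infer_instance

-- ===== CLAIM (what is proved, stated in full; the proofs are below) =====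
def Claim_equal_slice_numbers : Prop := ∀ (row : List (String × String)), Dom_slice_numbers row → Pre_slice_numbers row → Spec_slice_numbers row (slice_numbers row)

-- ===== LEMMAS AND PROOFS =====

-- the ten digit characters, in order
def pvDChars : List Char := ['0','1','2','3','4','5','6','7','8','9']

theorem pv_digits_eq : pvDigits = pvDChars := by decide

-- a one-character substring test is a character membership test
theorem pv_isIn_single (c : Char) (s : String) :
    PySem.Str.isIn (String.ofList [c]) s = s.toList.contains c := by
  rw [Bool.eq_iff_iff]
  simp [PySem.Chars.isIn_iff_infix, List.singleton_infix_iff]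

-- A's loop over range(10), as an any over the ten digit characters
theorem pv_A_any (s1 s2 : String) :
    (PySem.List.pyRange 0 10 1).any (fun num =>
        (PySem.Str.isIn (PySem.Int.toStr num) s2 && !(PySem.Str.isIn (PySem.Int.toStr num) s1)) ||
        (PySem.Str.isIn (PySem.Int.toStr num) s1 && !(PySem.Str.isIn (PySem.Int.toStr num) s2)))
    = pvDChars.any (fun c =>
        (s2.toList.contains c && !(s1.toList.contains c)) ||
        (s1.toList.contains c && !(s2.toList.contains c))) := by
  rw [show PySem.List.pyRange 0 10 1 = [0,1,2,3,4,5,6,7,8,9] from by decide]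
  simp only [pvDChars, List.any_cons, List.any_nil]
  rw [show PySem.Int.toStr 0 = String.ofList ['0'] from by decide,
      show PySem.Int.toStr 1 = String.ofList ['1'] from by decide,
      show PySem.Int.toStr 2 = String.ofList ['2'] from by decide,
      show PySem.Int.toStr 3 = String.ofList ['3'] from by decide,
      show PySem.Int.toStr 4 = String.ofList ['4'] from by decide,
      show PySem.Int.toStr 5 = String.ofList ['5'] from by decide,
      show PySem.Int.toStr 6 = String.ofList ['6'] from by decide,
      show PySem.Int.toStr 7 = String.ofList ['7'] from by decide,
      show PySem.Int.toStr 8 = String.ofList ['8'] from by decide,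
      show PySem.Int.toStr 9 = String.ofList ['9'] from by decide]
  simp only [pv_isIn_single]

-- B's digit-set comparison, as the same any over the ten digit characters
theorem pv_B_any (s1 s2 : String) :
    (!(PySem.Set.equal (PySem.Set.inter (PySem.Set.ofList s1.toList) pvDigits)
                       (PySem.Set.inter (PySem.Set.ofList s2.toList) pvDigits)))
    = pvDChars.any (fun c =>
        (s2.toList.contains c && !(s1.toList.contains c)) ||
        (s1.toList.contains c && !(s2.toList.contains c))) := by
  rw [Bool.eq_iff_iff, Bool.not_eq_true', ← Bool.not_eq_true
    (PySem.Set.equal _ _), ← not_iff_not, not_not, PySem.Set.equal_iff]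
  simp only [List.any_eq_true, Bool.or_eq_true, Bool.and_eq_true, Bool.not_eq_true',
    List.contains_iff_mem, Bool.eq_false_iff, ne_eq, PySem.Set.mem_inter, PySem.Set.mem_ofList,
    not_exists, not_and, not_or, not_not, pv_digits_eq]
  constructor
  · intro h c hc
    have := h c
    constructor <;> intro hm <;> by_contra hn <;>
      simp only [List.contains_iff_mem] at hn <;> tauto
  · intro h x
    by_cases hx : x ∈ pvDChars
    · have := h x hx
      simp only [List.contains_iff_mem] at this
      tauto
    · tauto

-- ===== VERDICT (by name: the statement is the Claim_ definition above) =====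
theorem slice_numbers_spec : Claim_equal_slice_numbers := by
  intro row _ hpre
  obtain ⟨h1, h2⟩ := hpre
  unfold Spec_slice_numbers slice_numbers slice_numbers_alt
  rw [Option.isSome_iff_exists] at h1 h2
  obtain ⟨p1, hp1⟩ := h1
  obtain ⟨p2, hp2⟩ := h2
  unfold pvLookup
  rw [hp1, hp2]
  simp only [Option.map_some]
  simp only [pv_A_any, pv_B_any]
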